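-- pv_equiv track=rewrite | github.com/LouisJauniau/TER_privacy_attack | ter_attacker_08_04/scripts/attack_common.py | infer_last_visible_level
-- ===== SOURCE A (Python) =====
-- SUPPRESSION_TOKENS = {"", "*"}
--
-- def is_suppressed_value(value: str) -> bool:
--     value = str(value).strip()
--     if value in SUPPRESSION_TOKENS:
--         return True
--     return bool(value) and set(value) == {"*"}
--
-- def infer_last_visible_level(hierarchy_rows: list[list[str]], observed_values: list[str]) -> int:
--     observed = {str(value).strip() for value in observed_values if not is_suppressed_value(value)}
--     if not observed:
--         return 0
--
--     max_depth = max(len(row) for row in hierarchy_rows)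
--     compatible_levels: list[int] = []
--     for level in range(max_depth):
--         labels = {str(row[level]).strip() for row in hierarchy_rows if level < len(row)}
--         if observed.issubset(labels):
--             compatible_levels.append(level)
--
--     if not compatible_levels:
--         return 0
--     return min(compatible_levels)
-- ===== SOURCE B (Python) =====
-- SUPPRESSION_TOKENS = {"", "*"}
--
-- def is_suppressed_value(value: str) -> bool:
--     value = str(value).strip()
--     if value in SUPPRESSION_TOKENS:
--         return True
--     return bool(value) and set(value) == {"*"}
--
-- def infer_last_visible_level(hierarchy_rows: list[list[str]], observed_values: list[str]) -> int:
--     observed = {str(value).strip() for value in observed_values if not is_suppressed_value(value)}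
--     if not observed:
--         return 0
--
--     # inverted index: stripped cell value -> set of levels where it appears
--     index: dict[str, set[int]] = {}
--     for row in hierarchy_rows:
--         for j, cell in enumerate(row):
--             index.setdefault(str(cell).strip(), set()).add(j)
--
--     common = None
--     for value in observed:
--         levels = index.get(value)
--         if not levels:
--             return 0
--         common = levels if common is None else common & levels
--     if not common:
--         return 0
--     return min(common)
-- ===== Notes on version B (the rewrite author's own statement) =====
-- stated objective: alternative
-- what changed: Replaces A's per-level rebuild of a label set and subset test with a single pass building an inverted index (stripped cell value -> set of levels) that is then intersected across the observed values, the minimum of the intersection being the answer.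
-- outside the precondition, e.g. on infer_last_visible_level([], ['a']): A raises ValueError, B returns 0
import Mathlib
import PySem

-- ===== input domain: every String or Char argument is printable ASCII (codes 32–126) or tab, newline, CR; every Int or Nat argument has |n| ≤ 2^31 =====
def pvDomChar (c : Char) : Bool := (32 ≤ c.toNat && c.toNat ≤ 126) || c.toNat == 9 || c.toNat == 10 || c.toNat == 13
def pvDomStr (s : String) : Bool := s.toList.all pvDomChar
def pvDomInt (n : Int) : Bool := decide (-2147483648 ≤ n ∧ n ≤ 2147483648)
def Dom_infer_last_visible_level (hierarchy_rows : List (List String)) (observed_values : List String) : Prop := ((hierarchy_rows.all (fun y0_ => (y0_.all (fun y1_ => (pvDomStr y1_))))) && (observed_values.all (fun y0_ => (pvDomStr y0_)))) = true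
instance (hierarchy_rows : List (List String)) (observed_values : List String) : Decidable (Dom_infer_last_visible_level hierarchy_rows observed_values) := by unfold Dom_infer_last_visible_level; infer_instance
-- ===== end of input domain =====

-- B replaces A's per-level relabel-and-subset-test with a one-pass inverted index (stripped cell value → set of levels) intersected over the observed values (objective: alternative decomposition, same exact result).

-- ===== PORT A =====
-- is_suppressed_value (shared by A, B and Pre_)
def pvSuppressed (value : String) : Bool :=
  let v := PySem.Str.strip value
  if v = "" || v = "*" then true
  else !v.toList.isEmpty && v.toList.all (fun c => c == '*')

def infer_last_visible_level (hierarchy_rows : List (List String)) (observed_values : List String) : Int :=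
  let observed : PySem.Set String :=
    observed_values.foldl (fun s v => if pvSuppressed v then s else PySem.Set.add s (PySem.Str.strip v)) PySem.Set.empty
  if observed.isEmpty then 0
  else
    match PySem.List.max? (hierarchy_rows.map (fun r => (r.length : Int))) (fun x => x) with
    | none => 0  -- Python raises ValueError here (max of empty sequence); excluded by Pre_
    | some max_depth =>
      let compatible : List Int :=
        (PySem.List.pyRange 0 max_depth 1).foldl (fun acc level =>
          let labels : PySem.Set String :=
            hierarchy_rows.foldl (fun s row =>
              if level < (row.length : Int) then PySem.Set.add s (PySem.Str.strip (PySem.List.pyGetD row level "")) else s)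
              PySem.Set.empty
          if PySem.Set.issubset observed labels then acc ++ [level] else acc) []
      if compatible.isEmpty then 0
      else (PySem.List.min? compatible (fun x => x)).getD 0

-- ===== PORT B =====
def infer_last_visible_level_alt (hierarchy_rows : List (List String)) (observed_values : List String) : Int :=
  let observed : PySem.Set String :=
    observed_values.foldl (fun s v => if pvSuppressed v then s else PySem.Set.add s (PySem.Str.strip v)) PySem.Set.empty
  if observed.isEmpty then 0
  else
    -- inverted index: stripped cell value -> set of levels where it appears
    let index : PySem.Dict String (PySem.Set Int) :=
      hierarchy_rows.foldl (fun d row =>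
        (PySem.List.enumerate row).foldl (fun d p =>
          PySem.Dict.modify d (PySem.Str.strip p.2) PySem.Set.empty (fun s => PySem.Set.add s p.1)) d)
        PySem.Dict.empty
    -- loop over observed; outer none = early 'return 0', inner none = common is still Python's None
    let common : Option (Option (PySem.Set Int)) :=
      observed.foldl (fun acc v =>
        match acc with
        | none => none
        | some c =>
          match PySem.Dict.get? index v with
          | none => none
          | some levels =>
            if levels.isEmpty then none
            else match c with
              | none => some (some levels)
              | some c' => some (some (PySem.Set.inter c' levels)))
        (some none)
    match common with
    | none => 0
    | some none => 0
    | some (some c) =>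
      if c.isEmpty then 0
      else (PySem.List.min? c (fun x => x)).getD 0

-- ===== PRECONDITION & SPEC =====
-- Pre_ excludes only the inputs where A raises ValueError: hierarchy_rows == [] while some observed value survives the suppression filter (max() of an empty sequence).
def Pre_infer_last_visible_level (hierarchy_rows : List (List String)) (observed_values : List String) : Prop :=
  hierarchy_rows ≠ [] ∨ (∀ v ∈ observed_values, pvSuppressed v = true)
instance (hierarchy_rows : List (List String)) (observed_values : List String) : Decidable (Pre_infer_last_visible_level hierarchy_rows observed_values) := by unfold Pre_infer_last_visible_level; infer_instance
def pvWitness_infer_last_visible_level : List (List String) × List String := ([["a", "b"], ["c"]], ["a", "c"])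

def Spec_infer_last_visible_level (hierarchy_rows : List (List String)) (observed_values : List String) (out : Int) : Prop := out = infer_last_visible_level_alt hierarchy_rows observed_values
instance (hierarchy_rows : List (List String)) (observed_values : List String) (out : Int) : Decidable (Spec_infer_last_visible_level hierarchy_rows observed_values out) := by unfold Spec_infer_last_visible_level; infer_instance

-- ===== CLAIM (what is proved, stated in full; the proofs are below) =====
def Claim_equal_infer_last_visible_level : Prop := ∀ (hierarchy_rows : List (List String)) (observed_values : List String), Dom_infer_last_visible_level hierarchy_rows observed_values → Pre_infer_last_visible_level hierarchy_rows observed_values → Spec_infer_last_visible_level hierarchy_rows observed_values (infer_last_visible_level hierarchy_rows observed_values)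
-- ===== LEMMAS AND PROOFS =====

-- the observed-set fold returns its accumulator when every value is suppressed
lemma pv_obs_all_suppressed (obs : List String) (s : PySem.Set String)
    (h : ∀ v ∈ obs, pvSuppressed v = true) :
    obs.foldl (fun s v => if pvSuppressed v then s else PySem.Set.add s (PySem.Str.strip v)) s = s := by
  induction obs generalizing s with
  | nil => rfl
  | cons w t ih =>
    simp only [List.foldl_cons, h w (by simp)]
    exact ih s (fun v hv => h v (by simp [hv]))

-- membership in A's per-level label set
lemma pv_mem_labels (rows : List (List String)) (ℓ : Int) (init : PySem.Set String) (y : String) :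
    y ∈ rows.foldl (fun s row =>
        if ℓ < (row.length : Int) then PySem.Set.add s (PySem.Str.strip (PySem.List.pyGetD row ℓ "")) else s) init
      ↔ y ∈ init ∨ ∃ row ∈ rows, ℓ < (row.length : Int) ∧ PySem.Str.strip (PySem.List.pyGetD row ℓ "") = y := by
  induction rows generalizing init with
  | nil => simp
  | cons r t ih =>
    simp only [List.foldl_cons]
    by_cases h : ℓ < (r.length : Int)
    · rw [if_pos h, ih]
      rw [PySem.Set.mem_add]
      constructor
      · rintro ((hm | rfl) | ⟨row, hrow, hh⟩)
        · exact Or.inl hm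
        · exact Or.inr ⟨r, by simp, h, rfl⟩
        · exact Or.inr ⟨row, by simp [hrow], hh⟩
      · rintro (hm | ⟨row, hrow, hh⟩)
        · exact Or.inl (Or.inl hm)
        · rcases List.mem_cons.mp hrow with rfl | hrow
          · exact Or.inl (Or.inr hh.2.symm)
          · exact Or.inr ⟨row, hrow, hh⟩
    · rw [if_neg h, ih]
      constructor
      · rintro (hm | ⟨row, hrow, hh⟩)
        · exact Or.inl hm
        · exact Or.inr ⟨row, by simp [hrow], hh⟩
      · rintro (hm | ⟨row, hrow, hh⟩)
        · exact Or.inl hm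
        · rcases List.mem_cons.mp hrow with rfl | hrow
          · exact absurd hh.1 h
          · exact Or.inr ⟨row, hrow, hh⟩

-- membership in the level set stored by one row's enumerate-fold (generalized to any pair list)
lemma pv_mem_inner (ps : List (Int × String)) (d : PySem.Dict String (PySem.Set Int)) (v : String) (ℓ : Int) :
    ℓ ∈ (ps.foldl (fun d p =>
        PySem.Dict.modify d (PySem.Str.strip p.2) PySem.Set.empty (fun s => PySem.Set.add s p.1)) d).getD v PySem.Set.empty
      ↔ ℓ ∈ d.getD v PySem.Set.empty ∨ ∃ p ∈ ps, PySem.Str.strip p.2 = v ∧ p.1 = ℓ := by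
  induction ps generalizing d with
  | nil => simp
  | cons p t ih =>
    simp only [List.foldl_cons]
    rw [ih]
    rw [PySem.Dict.getD_modify]
    by_cases h : v = PySem.Str.strip p.2
    · subst h
      simp [PySem.Set.mem_add]
      tauto
    · rw [if_neg h]
      constructor
      · rintro (hm | ⟨q, hq, h1, h2⟩)
        · exact Or.inl hm
        · exact Or.inr ⟨q, by simp [hq], h1, h2⟩
      · rintro (hm | ⟨q, hq, h1, h2⟩)
        · exact Or.inl hm
        · rcases List.mem_cons.mp hq with rfl | hq
          · exact absurd h1.symm h
          · exact Or.inr ⟨q, hq, h1, h2⟩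

-- membership in B's inverted index
lemma pv_mem_index (rows : List (List String)) (d : PySem.Dict String (PySem.Set Int)) (v : String) (ℓ : Int) :
    ℓ ∈ (rows.foldl (fun d row =>
        (PySem.List.enumerate row).foldl (fun d p =>
          PySem.Dict.modify d (PySem.Str.strip p.2) PySem.Set.empty (fun s => PySem.Set.add s p.1)) d) d).getD v PySem.Set.empty
      ↔ ℓ ∈ d.getD v PySem.Set.empty ∨
        ∃ row ∈ rows, ∃ p ∈ PySem.List.enumerate row, PySem.Str.strip p.2 = v ∧ p.1 = ℓ := by
  induction rows generalizing d with
  | nil => simp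
  | cons r t ih =>
    simp only [List.foldl_cons]
    rw [ih, pv_mem_inner]
    constructor
    · rintro ((hm | ⟨p, hp, h1, h2⟩) | ⟨row, hrow, hrest⟩)
      · exact Or.inl hm
      · exact Or.inr ⟨r, by simp, p, hp, h1, h2⟩
      · exact Or.inr ⟨row, by simp [hrow], hrest⟩
    · rintro (hm | ⟨row, hrow, hrest⟩)
      · exact Or.inl (Or.inl hm)
      · rcases List.mem_cons.mp hrow with rfl | hrow
        · exact Or.inl (Or.inr hrest)
        · exact Or.inr ⟨row, hrow, hrest⟩

-- enumerate membership as positions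
lemma pv_mem_enumerate (xs : List String) (p : Int × String) (s : Int) :
    p ∈ PySem.List.enumerate xs s ↔ ∃ j : Nat, j < xs.length ∧ p = (s + (j : Int), xs[j]!) := by
  induction xs generalizing s with
  | nil => simp [PySem.List.enumerate_nil]
  | cons x t ih =>
    rw [PySem.List.enumerate_cons, List.mem_cons, ih]
    constructor
    · rintro (rfl | ⟨j, hj, rfl⟩)
      · exact ⟨0, by simp⟩
      · exact ⟨j + 1, by simpa using hj, by simp; ring_nf⟩
    · rintro ⟨j, hj, rfl⟩
      cases j with
      | zero => exact Or.inl (by simp)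
      | succ k =>
        refine Or.inr ⟨k, by simpa using hj, ?_⟩
        simp only [List.getElem!_cons_succ, Prod.mk.injEq]
        refine ⟨by push_cast; ring, trivial⟩

-- the early-return fold: from none it stays none
lemma pv_fold_none (index : PySem.Dict String (PySem.Set Int)) (vs : List String) :
    vs.foldl (fun acc v =>
      match acc with
      | none => none
      | some c =>
        match PySem.Dict.get? index v with
        | none => none
        | some levels =>
          if levels.isEmpty then none
          else match c with
            | none => some (some levels)
            | some c' => some (some (PySem.Set.inter c' levels)))
      (none : Option (Option (PySem.Set Int))) = none := by
  induction vs with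
  | nil => rfl
  | cons v t ih => simpa using ih

-- if some observed value has an empty level set, the fold early-returns
lemma pv_fold_empty (index : PySem.Dict String (PySem.Set Int)) (vs : List String)
    (c : Option (PySem.Set Int))
    (h : ∃ v ∈ vs, index.getD v PySem.Set.empty = PySem.Set.empty) :
    vs.foldl (fun acc v =>
      match acc with
      | none => none
      | some c =>
        match PySem.Dict.get? index v with
        | none => none
        | some levels =>
          if levels.isEmpty then none
          else match c with
            | none => some (some levels)
            | some c' => some (some (PySem.Set.inter c' levels)))
      (some c) = none := by
  induction vs generalizing c with
  | nil => simp at h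
  | cons w t ih =>
    obtain ⟨v, hv, hve⟩ := h
    simp only [List.foldl_cons]
    by_cases hw : index.getD w PySem.Set.empty = PySem.Set.empty
    · rw [PySem.Dict.getD_eq_get?_getD] at hw
      rcases hg : PySem.Dict.get? index w with _ | levels
      · simp only [hg]
        exact pv_fold_none index t
      · rw [hg] at hw
        have hl : levels.isEmpty = true := by
          simp only [Option.getD_some] at hw
          simp [List.isEmpty_iff, hw]
        simp only [hg, hl, if_true]
        exact pv_fold_none index t
    · have hv' : v ∈ t := by
        rcases List.mem_cons.mp hv with rfl | hv'
        · exact absurd hve hw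
        · exact hv'
      rw [PySem.Dict.getD_eq_get?_getD] at hw
      rcases hg : PySem.Dict.get? index w with _ | levels
      · rw [hg] at hw
        simp at hw
      · have hl : levels.isEmpty = false := by
          rw [hg] at hw
          simp only [Option.getD_some] at hw
          simp [List.isEmpty_iff]
          exact hw
        simp only [hg, hl, if_false]
        cases c with
        | none => exact ih (some levels) ⟨v, hv', hve⟩
        | some c' => exact ih (some (PySem.Set.inter c' levels)) ⟨v, hv', hve⟩

-- if no observed value has an empty level set, the fold intersects all their level sets
lemma pv_fold_inter (index : PySem.Dict String (PySem.Set Int)) (vs : List String)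
    (c : PySem.Set Int)
    (h : ∀ v ∈ vs, index.getD v PySem.Set.empty ≠ PySem.Set.empty) :
    ∃ c', vs.foldl (fun acc v =>
      match acc with
      | none => none
      | some c =>
        match PySem.Dict.get? index v with
        | none => none
        | some levels =>
          if levels.isEmpty then none
          else match c with
            | none => some (some levels)
            | some c' => some (some (PySem.Set.inter c' levels)))
      (some (some c)) = some (some c') ∧
      ∀ ℓ, ℓ ∈ c' ↔ ℓ ∈ c ∧ ∀ v ∈ vs, ℓ ∈ index.getD v PySem.Set.empty := by
  induction vs generalizing c with
  | nil => exact ⟨c, rfl, by simp⟩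
  | cons w t ih =>
    have hw := h w (by simp)
    rw [PySem.Dict.getD_eq_get?_getD] at hw
    rcases hg : PySem.Dict.get? index w with _ | levels
    · rw [hg] at hw
      simp at hw
    · have hlev : index.getD w PySem.Set.empty = levels := by
        rw [PySem.Dict.getD_eq_get?_getD, hg]
        rfl
      have hl : levels.isEmpty = false := by
        rw [hg] at hw
        simp only [Option.getD_some] at hw
        simp [List.isEmpty_iff]
        exact hw
      obtain ⟨c', h1, h2⟩ := ih (PySem.Set.inter c levels) (fun v hv => h v (by simp [hv]))
      refine ⟨c', ?_, ?_⟩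
      · simp only [List.foldl_cons, hg, hl, if_false]
        exact h1
      · intro ℓ
        rw [h2 ℓ, PySem.Set.mem_inter]
        constructor
        · rintro ⟨⟨h3, h4⟩, h5⟩
          exact ⟨h3, fun v hv => by
            rcases List.mem_cons.mp hv with rfl | hv
            · rw [hlev]; exact h4
            · exact h5 v hv⟩
        · rintro ⟨h3, h4⟩
          exact ⟨⟨h3, by rw [← hlev]; exact h4 w (by simp)⟩, fun v hv => h4 v (by simp [hv])⟩

-- the whole observed loop, started from Python's 'common = None'
lemma pv_fold_start (index : PySem.Dict String (PySem.Set Int)) (v0 : String) (rest : List String) :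
    ((∃ v ∈ v0 :: rest, index.getD v PySem.Set.empty = PySem.Set.empty) ∧
      (v0 :: rest).foldl (fun acc v =>
        match acc with
        | none => none
        | some c =>
          match PySem.Dict.get? index v with
          | none => none
          | some levels =>
            if levels.isEmpty then none
            else match c with
              | none => some (some levels)
              | some c' => some (some (PySem.Set.inter c' levels)))
        (some none) = none) ∨
    ((∀ v ∈ v0 :: rest, index.getD v PySem.Set.empty ≠ PySem.Set.empty) ∧
      ∃ c', (v0 :: rest).foldl (fun acc v =>
        match acc with
        | none => none
        | some c =>
          match PySem.Dict.get? index v with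
          | none => none
          | some levels =>
            if levels.isEmpty then none
            else match c with
              | none => some (some levels)
              | some c' => some (some (PySem.Set.inter c' levels)))
        (some none) = some (some c') ∧
        ∀ ℓ, ℓ ∈ c' ↔ ∀ v ∈ v0 :: rest, ℓ ∈ index.getD v PySem.Set.empty) := by
  by_cases hv0 : index.getD v0 PySem.Set.empty = PySem.Set.empty
  · left
    refine ⟨⟨v0, by simp, hv0⟩, ?_⟩
    rw [PySem.Dict.getD_eq_get?_getD] at hv0
    simp only [List.foldl_cons]
    rcases hg : PySem.Dict.get? index v0 with _ | levels
    · simp only [hg]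
      exact pv_fold_none index rest
    · have hl : levels.isEmpty = true := by
        rw [hg] at hv0
        simp only [Option.getD_some] at hv0
        simp [List.isEmpty_iff, hv0]
      simp only [hg, hl, if_true]
      exact pv_fold_none index rest
  · have hlev : ∃ levels, PySem.Dict.get? index v0 = some levels ∧ levels.isEmpty = false ∧
        index.getD v0 PySem.Set.empty = levels := by
      rw [PySem.Dict.getD_eq_get?_getD] at hv0 ⊢
      rcases hg : PySem.Dict.get? index v0 with _ | levels
      · rw [hg] at hv0; simp at hv0
      · rw [hg] at hv0
        simp only [Option.getD_some] at hv0
        exact ⟨levels, rfl, by simp [List.isEmpty_iff]; exact hv0, rfl⟩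
    obtain ⟨levels, hg, hl, hlv⟩ := hlev
    by_cases hr : ∃ v ∈ rest, index.getD v PySem.Set.empty = PySem.Set.empty
    · left
      refine ⟨?_, ?_⟩
      · obtain ⟨v, hv, hve⟩ := hr
        exact ⟨v, by simp [hv], hve⟩
      · simp only [List.foldl_cons, hg, hl, if_false]
        exact pv_fold_empty index rest (some levels) hr
    · right
      push_neg at hr
      refine ⟨?_, ?_⟩
      · intro v hv
        rcases List.mem_cons.mp hv with rfl | hv
        · exact hv0
        · exact hr v hv
      · obtain ⟨c', h1, h2⟩ := pv_fold_inter index rest levels hr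
        refine ⟨c', ?_, ?_⟩
        · simp only [List.foldl_cons, hg, hl, if_false]
          exact h1
        · intro ℓ
          rw [h2 ℓ]
          constructor
          · rintro ⟨h3, h4⟩
            intro v hv
            rcases List.mem_cons.mp hv with rfl | hv
            · rw [hlv]; exact h3
            · exact h4 v hv
          · intro h3
            exact ⟨by rw [← hlv]; exact h3 v0 (by simp), fun v hv => h3 v (by simp [hv])⟩

-- bridge: a level is in the inverted index at v iff some row shows v (stripped) at that level
lemma pv_bridge (rows : List (List String)) (v : String) (ℓ : Int) :
    ℓ ∈ (rows.foldl (fun d row =>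
        (PySem.List.enumerate row).foldl (fun d p =>
          PySem.Dict.modify d (PySem.Str.strip p.2) PySem.Set.empty (fun s => PySem.Set.add s p.1)) d)
        PySem.Dict.empty).getD v PySem.Set.empty
      ↔ 0 ≤ ℓ ∧ ∃ row ∈ rows, ℓ < (row.length : Int) ∧
          PySem.Str.strip (PySem.List.pyGetD row ℓ "") = v := by
  rw [pv_mem_index]
  have hempty : (PySem.Dict.empty : PySem.Dict String (PySem.Set Int)).getD v PySem.Set.empty = PySem.Set.empty :=
    PySem.Dict.getD_empty _ _
  rw [hempty]
  simp only [PySem.Set.empty, List.not_mem_nil, false_or]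
  constructor
  · rintro ⟨row, hrow, p, hp, h1, h2⟩
    obtain ⟨j, hj, rfl⟩ := (pv_mem_enumerate row p 0).mp hp
    simp only at h1 h2
    have h0 : (0 : Int) + (j : Int) = ℓ := h2
    have hlen : ℓ < (row.length : Int) := by omega
    refine ⟨by omega, row, hrow, hlen, ?_⟩
    rw [PySem.List.pyGetD_eq_getElem row "" (by omega) hlen]
    have hjn : ℓ.toNat = j := by omega
    rw [← getElem!_pos row ℓ.toNat (by omega), hjn]
    exact h1
  · rintro ⟨h0, row, hrow, hlen, hv⟩
    refine ⟨row, hrow, (0 + (ℓ.toNat : Int), row[ℓ.toNat]!), ?_, ?_, by simp; omega⟩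
    · exact (pv_mem_enumerate row _ 0).mpr ⟨ℓ.toNat, by omega, rfl⟩
    · simp only
      rw [PySem.List.pyGetD_eq_getElem row "" h0 hlen] at hv
      rw [← getElem!_pos row ℓ.toNat (by omega)] at hv
      exact hv

-- equal membership of nonempty Int lists gives equal minima
lemma pv_min_eq (xs ys : List Int) (hx : xs ≠ []) (hy : ys ≠ [])
    (h : ∀ a, a ∈ xs ↔ a ∈ ys) :
    (PySem.List.min? xs (fun x => x)).getD 0 = (PySem.List.min? ys (fun x => x)).getD 0 := by
  obtain ⟨m, hm⟩ := Option.ne_none_iff_exists'.mp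
    (fun hn => hx ((PySem.List.min?_eq_none_iff xs (fun x => x)).mp hn))
  obtain ⟨n, hn⟩ := Option.ne_none_iff_exists'.mp
    (fun hn => hy ((PySem.List.min?_eq_none_iff ys (fun x => x)).mp hn))
  rw [hm, hn]
  simp only [Option.getD_some]
  have h1 := PySem.List.min?_isMin hm n ((h n).mpr (PySem.List.min?_mem hn))
  have h2 := PySem.List.min?_isMin hn m ((h m).mp (PySem.List.min?_mem hm))
  omega

-- ===== VERDICT (by name: the statement is the Claim_ definition above) =====
theorem infer_last_visible_level_spec : Claim_equal_infer_last_visible_level := by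
  intro rows obs _ hpre
  unfold Spec_infer_last_visible_level infer_last_visible_level infer_last_visible_level_alt
  set S : PySem.Set String :=
    obs.foldl (fun s v => if pvSuppressed v then s else PySem.Set.add s (PySem.Str.strip v)) PySem.Set.empty
    with hSdef
  by_cases hSe : S.isEmpty
  · simp only [hSe, if_true]
  simp only [hSe, if_false]
  have hSne : S ≠ [] := by
    intro h
    rw [h] at hSe
    exact hSe rfl
  have hrows : rows ≠ [] := by
    rcases hpre with h | h
    · exact h
    · exact absurd (hSdef.trans (pv_obs_all_suppressed obs PySem.Set.empty h)) hSne
  rcases hmd : PySem.List.max? (rows.map (fun r => ((r.length : Int)))) (fun x => x) with _ | md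
  · exact absurd (List.map_eq_nil_iff.mp ((PySem.List.max?_eq_none_iff _ _).mp hmd)) hrows
  have hmax : ∀ r ∈ rows, (r.length : Int) ≤ md := fun r hr =>
    PySem.List.max?_isMax hmd _ (List.mem_map_of_mem hr)
  simp only [hmd]
  rw [PySem.List.foldl_append_if_eq_filter, List.nil_append]
  obtain ⟨v0, rest, hcons⟩ := List.exists_cons_of_ne_nil hSne
  -- membership in A's filtered level list
  have hA : ∀ ℓ : Int, ℓ ∈ (PySem.List.pyRange 0 md 1).filter
      (fun level => PySem.Set.issubset S (rows.foldl (fun s row =>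
        if level < (row.length : Int) then PySem.Set.add s (PySem.Str.strip (PySem.List.pyGetD row level "")) else s)
        PySem.Set.empty)) ↔
      (0 ≤ ℓ ∧ ℓ < md) ∧ ∀ v ∈ S, ∃ row ∈ rows, ℓ < (row.length : Int) ∧
        PySem.Str.strip (PySem.List.pyGetD row ℓ "") = v := by
    intro ℓ
    rw [List.mem_filter, PySem.List.mem_pyRange_one]
    constructor
    · rintro ⟨⟨h0, h1⟩, h2⟩
      refine ⟨⟨h0, h1⟩, fun v hv => ?_⟩
      have := (PySem.Set.issubset_iff _ _).mp h2 v hv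
      rcases (pv_mem_labels rows ℓ PySem.Set.empty v).mp this with hm | hm
      · simp [PySem.Set.empty] at hm
      · exact hm
    · rintro ⟨⟨h0, h1⟩, h2⟩
      refine ⟨⟨h0, h1⟩, (PySem.Set.issubset_iff _ _).mpr fun v hv => ?_⟩
      exact (pv_mem_labels rows ℓ PySem.Set.empty v).mpr (Or.inr (h2 v hv))
  rcases pv_fold_start (rows.foldl (fun d row =>
      (PySem.List.enumerate row).foldl (fun d p =>
        PySem.Dict.modify d (PySem.Str.strip p.2) PySem.Set.empty (fun s => PySem.Set.add s p.1)) d)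
      PySem.Dict.empty) v0 rest with ⟨⟨v, hv, hve⟩, hfold⟩ | ⟨hall, c', hfold, hmem⟩
  · rw [← hcons] at hfold hv
    rw [hfold]
    have hfe : (PySem.List.pyRange 0 md 1).filter
        (fun level => PySem.Set.issubset S (rows.foldl (fun s row =>
          if level < (row.length : Int) then PySem.Set.add s (PySem.Str.strip (PySem.List.pyGetD row level "")) else s)
          PySem.Set.empty)) = [] := by
      rw [List.eq_nil_iff_forall_not_mem]
      intro ℓ hmem'
      obtain ⟨⟨h0, h1⟩, h2⟩ := (hA ℓ).mp hmem'
      obtain ⟨row, hrow, hlen, hstrip⟩ := h2 v hv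
      have : ℓ ∈ (rows.foldl (fun d row =>
          (PySem.List.enumerate row).foldl (fun d p =>
            PySem.Dict.modify d (PySem.Str.strip p.2) PySem.Set.empty (fun s => PySem.Set.add s p.1)) d)
          PySem.Dict.empty).getD v PySem.Set.empty :=
        (pv_bridge rows v ℓ).mpr ⟨h0, row, hrow, hlen, hstrip⟩
      rw [hve] at this
      simp [PySem.Set.empty] at this
    rw [hfe]
    rfl
  · rw [← hcons] at hfold hall hmem
    rw [hfold]
    have hB : ∀ ℓ : Int, ℓ ∈ c' ↔
        (0 ≤ ℓ ∧ ℓ < md) ∧ ∀ v ∈ S, ∃ row ∈ rows, ℓ < (row.length : Int) ∧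
          PySem.Str.strip (PySem.List.pyGetD row ℓ "") = v := by
      intro ℓ
      rw [hmem ℓ]
      constructor
      · intro h
        have h0 : 0 ≤ ℓ := ((pv_bridge rows v0 ℓ).mp (h v0 (by rw [hcons]; simp))).1
        have hv0' := ((pv_bridge rows v0 ℓ).mp (h v0 (by rw [hcons]; simp))).2
        obtain ⟨row, hrow, hlen, _⟩ := hv0'
        have hℓmd : ℓ < md := lt_of_lt_of_le hlen (hmax row hrow)
        exact ⟨⟨h0, hℓmd⟩, fun v hv => ((pv_bridge rows v ℓ).mp (h v hv)).2⟩
      · rintro ⟨⟨h0, _⟩, h2⟩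
        exact fun v hv => (pv_bridge rows v ℓ).mpr ⟨h0, h2 v hv⟩
    have hsame : ∀ ℓ : Int, ℓ ∈ (PySem.List.pyRange 0 md 1).filter
        (fun level => PySem.Set.issubset S (rows.foldl (fun s row =>
          if level < (row.length : Int) then PySem.Set.add s (PySem.Str.strip (PySem.List.pyGetD row level "")) else s)
          PySem.Set.empty)) ↔ ℓ ∈ c' := fun ℓ => (hA ℓ).trans (hB ℓ).symm
    by_cases hce : c' = []
    · have hfe : (PySem.List.pyRange 0 md 1).filter
          (fun level => PySem.Set.issubset S (rows.foldl (fun s row =>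
            if level < (row.length : Int) then PySem.Set.add s (PySem.Str.strip (PySem.List.pyGetD row level "")) else s)
            PySem.Set.empty)) = [] := by
        rw [List.eq_nil_iff_forall_not_mem]
        intro ℓ hmem'
        have := (hsame ℓ).mp hmem'
        rw [hce] at this
        simp at this
      rw [hfe, hce]
    · have hfne : (PySem.List.pyRange 0 md 1).filter
          (fun level => PySem.Set.issubset S (rows.foldl (fun s row =>
            if level < (row.length : Int) then PySem.Set.add s (PySem.Str.strip (PySem.List.pyGetD row level "")) else s)
            PySem.Set.empty)) ≠ [] := by
        obtain ⟨ℓ, rest', hc⟩ := List.exists_cons_of_ne_nil hce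
        intro h
        have : ℓ ∈ c' := by rw [hc]; simp
        have := (hsame ℓ).mpr this
        rw [h] at this
        simp at this
      have h1 : ((PySem.List.pyRange 0 md 1).filter
          (fun level => PySem.Set.issubset S (rows.foldl (fun s row =>
            if level < (row.length : Int) then PySem.Set.add s (PySem.Str.strip (PySem.List.pyGetD row level "")) else s)
            PySem.Set.empty))).isEmpty = false := List.isEmpty_eq_false_iff.mpr hfne
      have h2 : c'.isEmpty = false := List.isEmpty_eq_false_iff.mpr hce
      simp only [h1, h2, if_false]
      exact pv_min_eq _ _ hfne hce hsame
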